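-- pv_equiv track=rewrite | github.com/grahamwang/algorithm | prim(PQ eager).py | heap_delete
-- ===== SOURCE A (Python) =====
-- def heap_delete(H, v, map_V, map_E):
--     # Delete vertex (cheapest edge cost of the vertex) in position k from heap H
--     # Update mapping to vertices and edges
--     k = map_V.index(v)
--     H[k], H[-1] = H[-1], H[k]
--     map_V[k], map_V[-1] = map_V[-1], map_V[k]
--     map_E[k], map_E[-1] = map_E[-1], map_E[k]
--     H.pop()
--     map_V.pop()
--     map_E.pop()
--     n = len(H)
--     if k == n:
--         return H, map_V, map_E
--     else:
--         while 2 * (k + 1) <= n:  # bubble down if larger than child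
--             if 2 * (k + 1) + 1 > n:
--                 if H[k] > H[2 * (k + 1) - 1]:
--                     H[k], H[2 * (k + 1) - 1] = H[2 * (k + 1) - 1], H[k]
--                     map_V[k], map_V[2 * (k + 1) - 1] = map_V[2 * (k + 1) - 1], map_V[k]
--                     map_E[k], map_E[2 * (k + 1) - 1] = map_E[2 * (k + 1) - 1], map_E[k]
--                     k = 2 * (k + 1) - 1
--                 else:
--                     break
--             else:
--                 if H[k] > min(H[2 * (k + 1) - 1], H[2 * (k + 1)]):
--                     if min(H[2 * (k + 1) - 1], H[2 * (k + 1)]) == H[2 * (k + 1) - 1]: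
--                         H[k], H[2 * (k + 1) - 1] = H[2 * (k + 1) - 1], H[k]
--                         map_V[k], map_V[2 * (k + 1) - 1] = map_V[2 * (k + 1) - 1], map_V[k]
--                         map_E[k], map_E[2 * (k + 1) - 1] = map_E[2 * (k + 1) - 1], map_E[k]
--                         k = 2 * (k + 1) - 1
--                     elif min(H[2 * (k + 1) - 1], H[2 * (k + 1)]) == H[2 * (k + 1)]:
--                         H[k], H[2 * (k + 1)] = H[2 * (k + 1)], H[k]
--                         map_V[k], map_V[2 * (k + 1)] = map_V[2 * (k + 1)], map_V[k]
--                         map_E[k], map_E[2 * (k + 1)] = map_E[2 * (k + 1)], map_E[k]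
--                         k = 2 * (k + 1)
--                 else:
--                     break
--         while (k + 1) // 2 - 1 >= 0 and H[k] < H[(k + 1) // 2 - 1]:  # bubble up if smaller than parent
--             H[k], H[(k + 1) // 2 - 1] = H[(k + 1) // 2 - 1], H[k]
--             map_V[k], map_V[(k + 1) // 2 - 1] = map_V[(k + 1) // 2 - 1], map_V[k]
--             map_E[k], map_E[(k + 1) // 2 - 1] = map_E[(k + 1) // 2 - 1], map_E[k]
--             k = (k + 1) // 2 - 1
--         return H, map_V, map_E
-- ===== SOURCE B (Python) =====
-- # Hole technique: instead of repeated three-array swaps, pop the last entries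
-- # into the hole, compute the whole sift path read-only (comparing the moved key
-- # x against H only), then do ONE cyclic shift per array along that path.
-- # Mutates H, map_V, map_E in place like the original.
--
-- def _shift(A, path, last_val):
--     # move each entry one step toward the front of the path, put last_val at the end
--     for i in range(len(path) - 1):
--         A[path[i]] = A[path[i + 1]]
--     A[path[-1]] = last_val
--
--
-- def heap_delete(H, v, map_V, map_E):
--     k = map_V.index(v)
--     xh, xv, xe = H.pop(), map_V.pop(), map_E.pop()
--     n = len(H)
--     if k == n:
--         return H, map_V, map_E
--     H[k], map_V[k], map_E[k] = xh, xv, xe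
--     # descent path: follow the smaller child (left on ties) while it beats x
--     path = [k]
--     j = k
--     while 2 * j + 1 < n:
--         c = 2 * j + 1
--         if c + 1 < n and H[c + 1] < H[c]:
--             c = c + 1
--         if xh > H[c]:
--             path.append(c)
--             j = c
--         else:
--             break
--     _shift(H, path, xh)
--     _shift(map_V, path, xv)
--     _shift(map_E, path, xe)
--     # ascent path from where x landed: follow parents strictly larger than x
--     path = [j]
--     while j > 0 and xh < H[(j - 1) // 2]:
--         j = (j - 1) // 2
--         path.append(j)
--     _shift(H, path, xh)
--     _shift(map_V, path, xv)
--     _shift(map_E, path, xe)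
--     return H, map_V, map_E
-- ===== Notes on version B (the rewrite author's own statement) =====
-- stated objective: alternative
-- what changed: Replaces A's swap-with-last prologue and two re-heapify loops of repeated three-array swaps by the hole technique: pop the last entries into the deleted slot, compute the whole descent/ascent path read-only (comparing the moved key against H only), then perform one cyclic shift per array along each path; …
-- outside the precondition, e.g. on heap_delete([1], 0, [0], [5, 6]): A returns ([], [], [6]), B returns ([], [], [5])
import Mathlib
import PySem

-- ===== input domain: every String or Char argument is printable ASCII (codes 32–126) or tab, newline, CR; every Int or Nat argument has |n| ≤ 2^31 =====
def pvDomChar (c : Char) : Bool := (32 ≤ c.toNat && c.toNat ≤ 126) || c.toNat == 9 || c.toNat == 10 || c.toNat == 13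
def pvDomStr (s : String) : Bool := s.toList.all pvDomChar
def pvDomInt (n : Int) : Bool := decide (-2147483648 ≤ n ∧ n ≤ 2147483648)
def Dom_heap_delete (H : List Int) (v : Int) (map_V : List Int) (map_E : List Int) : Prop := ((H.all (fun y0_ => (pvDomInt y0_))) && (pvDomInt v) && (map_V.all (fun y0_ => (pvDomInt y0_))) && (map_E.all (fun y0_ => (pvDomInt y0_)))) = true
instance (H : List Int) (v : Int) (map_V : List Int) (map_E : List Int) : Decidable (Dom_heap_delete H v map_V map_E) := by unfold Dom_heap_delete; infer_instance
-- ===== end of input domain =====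

-- B replaces A's repeated three-array swap loops by the hole technique: pop the last
-- entries into the deleted slot, compute the whole sift path READ-ONLY (comparing the
-- moved key against H only), then perform one cyclic shift per array along that path.
-- Both versions mutate H, map_V, map_E in place in Python; the returned triple is what
-- is proved equal here (the final list states coincide as well, being that triple).
-- Both loop ports carry a `fuel` counter as a pure totality guard (fuel n suffices:
-- each loop index moves strictly toward its bound every iteration).

-- ===== PORT A =====
-- A's bubble-down while-loop; k is A's loop variable (always a nonnegative Python int, hence Nat).
-- Indices are in range whenever Pre_ holds, so `getD _ 0` reads exactly what Python reads.
def bubbleDownA (fuel : Nat) (H mV mE : List Int) (n k : Nat) : List Int × List Int × List Int × Nat :=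
  match fuel with
  | 0 => (H, mV, mE, k)
  | fuel + 1 =>
    if 2 * (k + 1) ≤ n then
      if 2 * (k + 1) + 1 > n then
        if H.getD k 0 > H.getD (2 * (k + 1) - 1) 0 then
          bubbleDownA fuel
            ((H.set k (H.getD (2 * (k + 1) - 1) 0)).set (2 * (k + 1) - 1) (H.getD k 0))
            ((mV.set k (mV.getD (2 * (k + 1) - 1) 0)).set (2 * (k + 1) - 1) (mV.getD k 0))
            ((mE.set k (mE.getD (2 * (k + 1) - 1) 0)).set (2 * (k + 1) - 1) (mE.getD k 0))
            n (2 * (k + 1) - 1)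
        else (H, mV, mE, k)
      else
        if H.getD k 0 > min (H.getD (2 * (k + 1) - 1) 0) (H.getD (2 * (k + 1)) 0) then
          if min (H.getD (2 * (k + 1) - 1) 0) (H.getD (2 * (k + 1)) 0) = H.getD (2 * (k + 1) - 1) 0 then
            bubbleDownA fuel
              ((H.set k (H.getD (2 * (k + 1) - 1) 0)).set (2 * (k + 1) - 1) (H.getD k 0))
              ((mV.set k (mV.getD (2 * (k + 1) - 1) 0)).set (2 * (k + 1) - 1) (mV.getD k 0))
              ((mE.set k (mE.getD (2 * (k + 1) - 1) 0)).set (2 * (k + 1) - 1) (mE.getD k 0))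
              n (2 * (k + 1) - 1)
          else if min (H.getD (2 * (k + 1) - 1) 0) (H.getD (2 * (k + 1)) 0) = H.getD (2 * (k + 1)) 0 then
            bubbleDownA fuel
              ((H.set k (H.getD (2 * (k + 1)) 0)).set (2 * (k + 1)) (H.getD k 0))
              ((mV.set k (mV.getD (2 * (k + 1)) 0)).set (2 * (k + 1)) (mV.getD k 0))
              ((mE.set k (mE.getD (2 * (k + 1)) 0)).set (2 * (k + 1)) (mE.getD k 0))
              n (2 * (k + 1))
          else (H, mV, mE, k)  -- unreachable: min of two values equals one of them
        else (H, mV, mE, k)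
    else (H, mV, mE, k)

-- A's bubble-up while-loop: guard (k+1)//2 - 1 >= 0 is k ≥ 1 for a nonnegative int k.
def bubbleUpA (fuel : Nat) (H mV mE : List Int) (k : Nat) : List Int × List Int × List Int :=
  match fuel with
  | 0 => (H, mV, mE)
  | fuel + 1 =>
    if 1 ≤ k ∧ H.getD k 0 < H.getD ((k + 1) / 2 - 1) 0 then
      bubbleUpA fuel
        ((H.set k (H.getD ((k + 1) / 2 - 1) 0)).set ((k + 1) / 2 - 1) (H.getD k 0))
        ((mV.set k (mV.getD ((k + 1) / 2 - 1) 0)).set ((k + 1) / 2 - 1) (mV.getD k 0))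
        ((mE.set k (mE.getD ((k + 1) / 2 - 1) 0)).set ((k + 1) / 2 - 1) (mE.getD k 0))
        ((k + 1) / 2 - 1)
    else (H, mV, mE)

def heap_delete (H : List Int) (v : Int) (map_V : List Int) (map_E : List Int) : List Int × List Int × List Int :=
  match PySem.List.index? map_V v with
  | none => (H, map_V, map_E)  -- Python raises ValueError here; excluded by Pre_
  | some k =>
    -- swap position k with the last position in all three lists, then pop the last element
    let H1 := ((H.set k (H.getD (H.length - 1) 0)).set (H.length - 1) (H.getD k 0)).dropLast
    let mV1 := ((map_V.set k (map_V.getD (map_V.length - 1) 0)).set (map_V.length - 1) (map_V.getD k 0)).dropLast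
    let mE1 := ((map_E.set k (map_E.getD (map_E.length - 1) 0)).set (map_E.length - 1) (map_E.getD k 0)).dropLast
    let n := H1.length
    if k = n then (H1, mV1, mE1)
    else
      match bubbleDownA n H1 mV1 mE1 n k with
      | (H2, mV2, mE2, k2) => bubbleUpA n H2 mV2 mE2 k2

-- ===== PORT B =====
-- _shift A path x : one cyclic shift of A along path (here path is start :: rest);
-- each entry moves one step toward the front of the path, x goes to the path's end.
def shiftB (A : List Int) (x : Int) (p : Nat) (path : List Nat) : List Int :=
  match path with
  | [] => A.set p x
  | c :: rest => shiftB (A.set p (A.getD c 0)) x c rest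

-- B's chosen child: the right child if it exists and is strictly smaller, else the left.
def childB (H : List Int) (n j : Nat) : Nat :=
  if 2 * j + 2 < n ∧ H.getD (2 * j + 2) 0 < H.getD (2 * j + 1) 0 then 2 * j + 2 else 2 * j + 1

-- B's read-only descent path: follow the smaller child (left on ties) while it beats x.
def pathDownB (fuel : Nat) (H : List Int) (n : Nat) (x : Int) (j : Nat) : List Nat :=
  match fuel with
  | 0 => []
  | fuel + 1 =>
    if 2 * j + 1 < n then
      if x > H.getD (childB H n j) 0 then childB H n j :: pathDownB fuel H n x (childB H n j) else []
    else []

-- B's read-only ascent path: follow parents strictly larger than x.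
def pathUpB (fuel : Nat) (H : List Int) (x : Int) (j : Nat) : List Nat :=
  match fuel with
  | 0 => []
  | fuel + 1 =>
    if 0 < j ∧ x < H.getD ((j - 1) / 2) 0 then
      (j - 1) / 2 :: pathUpB fuel H x ((j - 1) / 2)
    else []

def heap_delete_alt (H : List Int) (v : Int) (map_V : List Int) (map_E : List Int) : List Int × List Int × List Int :=
  match PySem.List.index? map_V v with
  | none => (H, map_V, map_E)  -- Python raises ValueError here; excluded by Pre_
  | some k =>
    let xh := H.getD (H.length - 1) 0       -- H.pop()
    let xv := map_V.getD (map_V.length - 1) 0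
    let xe := map_E.getD (map_E.length - 1) 0
    let H0 := H.dropLast
    let mV0 := map_V.dropLast
    let mE0 := map_E.dropLast
    let n := H0.length
    if k = n then (H0, mV0, mE0)
    else
      let H1 := H0.set k xh                 -- drop the popped entries into the hole
      let mV1 := mV0.set k xv
      let mE1 := mE0.set k xe
      let p := pathDownB n H1 n xh k
      let H2 := shiftB H1 xh k p
      let mV2 := shiftB mV1 xv k p
      let mE2 := shiftB mE1 xe k p
      let j := p.getLastD k
      let q := pathUpB n H2 xh j
      (shiftB H2 xh j q, shiftB mV2 xv j q, shiftB mE2 xe j q)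

-- ===== PRECONDITION & SPEC =====
-- Pre_ excludes inputs where v is missing from map_V (A raises ValueError) and inputs whose
-- three parallel arrays have unequal lengths — malformed parallel-array input, on which A
-- either raises IndexError or returns one of several equally defensible values (it swaps each
-- list with its own last slot, B pops each list's last entry into the heap-indexed hole;
-- neither is specified for mismatched arrays).
def Pre_heap_delete (H : List Int) (v : Int) (map_V : List Int) (map_E : List Int) : Prop :=
  v ∈ map_V ∧ map_V.length = H.length ∧ map_E.length = H.length
instance (H : List Int) (v : Int) (map_V : List Int) (map_E : List Int) : Decidable (Pre_heap_delete H v map_V map_E) := by unfold Pre_heap_delete; infer_instance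

def pvWitness_heap_delete : List Int × Int × List Int × List Int := ([2, 5, 3], 7, [1, 7, 4], [10, 20, 30])

def Spec_heap_delete (H : List Int) (v : Int) (map_V : List Int) (map_E : List Int) (out : List Int × List Int × List Int) : Prop := out = heap_delete_alt H v map_V map_E
instance (H : List Int) (v : Int) (map_V : List Int) (map_E : List Int) (out : List Int × List Int × List Int) : Decidable (Spec_heap_delete H v map_V map_E out) := by unfold Spec_heap_delete; infer_instance

-- ===== CLAIM =====
def Claim_equal_heap_delete : Prop := ∀ (H : List Int) (v : Int) (map_V : List Int) (map_E : List Int), Dom_heap_delete H v map_V map_E → Pre_heap_delete H v map_V map_E → Spec_heap_delete H v map_V map_E (heap_delete H v map_V map_E)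

-- ===== LEMMAS AND PROOFS =====
lemma getD_set_ne' (A : List Int) (p c : Nat) (y : Int) (hc : c ≠ p) : (A.set p y).getD c 0 = A.getD c 0 := by
  simp [List.getD_eq_getElem?_getD, List.getElem?_set_ne (Ne.symm hc)]

lemma getD_set_self' (A : List Int) (p : Nat) (x : Int) (hp : p < A.length) : (A.set p x).getD p 0 = x := by
  rw [List.getD_eq_getElem _ 0 (by simpa using hp), List.getElem_set_self]

lemma set_getD_self (l : List Int) (k : Nat) : l.set k (l.getD k 0) = l := by
  apply List.ext_getElem (by simp)
  intro i h1 h2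
  simp only [List.getElem_set]
  split
  · next he => subst he; rw [List.getD_eq_getElem l 0 h2]
  · rfl

lemma shiftB_set_head (path : List Nat) (A : List Int) (y x : Int) (p : Nat)
    (h : ∀ c ∈ path.head?, c ≠ p) : shiftB (A.set p y) x p path = shiftB A x p path := by
  cases path with
  | nil => simp [shiftB, List.set_set]
  | cons c rest =>
    have hc : c ≠ p := h c (by simp)
    simp only [shiftB]
    rw [getD_set_ne' A p c y hc, List.set_set]

lemma shiftB_length (path : List Nat) : ∀ (A : List Int) (x : Int) (p : Nat),
    (shiftB A x p path).length = A.length := by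
  induction path with
  | nil => intro A x p; simp [shiftB]
  | cons c rest ih => intro A x p; simp [shiftB, ih]

lemma shiftB_getD_last (path : List Nat) : ∀ (A : List Int) (x : Int) (p : Nat),
    p < A.length → (∀ c ∈ path, c < A.length) →
    (shiftB A x p path).getD (path.getLastD p) 0 = x := by
  induction path with
  | nil =>
    intro A x p hp _
    simp only [shiftB, List.getLastD_nil]
    exact getD_set_self' A p x hp
  | cons c rest ih =>
    intro A x p hp hmem
    simp only [shiftB, List.getLastD_cons]
    exact ih _ x c (by simpa using hmem c (by simp)) (fun d hd => by simpa using hmem d (by simp [hd]))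

lemma childB_gt (H : List Int) (n j : Nat) : j < childB H n j := by
  unfold childB; split <;> omega

lemma childB_lt (H : List Int) (n j : Nat) (h : 2 * j + 1 < n) : childB H n j < n := by
  unfold childB; split <;> omega

lemma childB_stable (H H' : List Int) (n j : Nat)
    (hag : ∀ i, j < i → H.getD i 0 = H'.getD i 0) : childB H n j = childB H' n j := by
  unfold childB
  rw [hag (2 * j + 1) (by omega), hag (2 * j + 2) (by omega)]

lemma pathDownB_mem (fuel : Nat) : ∀ (H : List Int) (n : Nat) (x : Int) (j : Nat),
    ∀ c ∈ pathDownB fuel H n x j, j < c ∧ c < n := by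
  induction fuel with
  | zero => intro H n x j c hc; simp [pathDownB] at hc
  | succ fuel ih =>
    intro H n x j c hc
    simp only [pathDownB] at hc
    split at hc
    · split at hc
      · rcases List.mem_cons.mp hc with h | h
        · subst h; exact ⟨childB_gt _ _ _, childB_lt _ _ _ (by assumption)⟩
        · have h2 := ih H n x _ c h
          exact ⟨lt_trans (childB_gt H n j) h2.1, h2.2⟩
      · simp at hc
    · simp at hc

lemma pathDownB_stable (fuel : Nat) : ∀ (H H' : List Int) (n : Nat) (x : Int) (j : Nat),
    (∀ i, j < i → H.getD i 0 = H'.getD i 0) →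
    pathDownB fuel H n x j = pathDownB fuel H' n x j := by
  induction fuel with
  | zero => intro _ _ _ _ _ _; rfl
  | succ fuel ih =>
    intro H H' n x j hag
    simp only [pathDownB]
    rw [childB_stable H H' n j hag, hag (childB H' n j) (by rw [← childB_stable H H' n j hag]; exact childB_gt H n j)]
    split
    · split
      · congr 1
        apply ih
        intro i hi
        exact hag i (lt_trans (by rw [← childB_stable H H' n j hag]; exact childB_gt H n j) hi)
      · rfl
    · rfl

lemma pathUpB_mem (fuel : Nat) : ∀ (H : List Int) (x : Int) (j : Nat),
    ∀ c ∈ pathUpB fuel H x j, c < j := by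
  induction fuel with
  | zero => intro H x j c hc; simp [pathUpB] at hc
  | succ fuel ih =>
    intro H x j c hc
    simp only [pathUpB] at hc
    split at hc
    · next hg =>
      rcases List.mem_cons.mp hc with h | h
      · subst h; omega
      · have := ih H x _ c h; omega
    · simp at hc

lemma pathUpB_stable (fuel : Nat) : ∀ (H H' : List Int) (x : Int) (j : Nat),
    (∀ i, i < j → H.getD i 0 = H'.getD i 0) →
    pathUpB fuel H x j = pathUpB fuel H' x j := by
  induction fuel with
  | zero => intro _ _ _ _ _; rfl
  | succ fuel ih =>
    intro H H' x j hag
    simp only [pathUpB]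
    by_cases hj : 0 < j
    · rw [hag ((j - 1) / 2) (by omega)]
      split
      · congr 1
        apply ih
        intro i hi
        exact hag i (by omega)
      · rfl
    · have : j = 0 := by omega
      subst this
      simp

lemma down_step (fuel : Nat) (H mV mE : List Int) (n k c : Nat)
    (hH : H.length = n) (hV : mV.length = n) (hE : mE.length = n)
    (hc : c < n) (hkc : k < c)
    (IH : ∀ (H mV mE : List Int) (k : Nat), H.length = n → mV.length = n → mE.length = n → k < n →
      bubbleDownA fuel H mV mE n k =
        (shiftB H (H.getD k 0) k (pathDownB fuel H n (H.getD k 0) k),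
         shiftB mV (mV.getD k 0) k (pathDownB fuel H n (H.getD k 0) k),
         shiftB mE (mE.getD k 0) k (pathDownB fuel H n (H.getD k 0) k),
         (pathDownB fuel H n (H.getD k 0) k).getLastD k)) :
    bubbleDownA fuel
      ((H.set k (H.getD c 0)).set c (H.getD k 0))
      ((mV.set k (mV.getD c 0)).set c (mV.getD k 0))
      ((mE.set k (mE.getD c 0)).set c (mE.getD k 0)) n c =
      (shiftB (H.set k (H.getD c 0)) (H.getD k 0) c (pathDownB fuel H n (H.getD k 0) c),
       shiftB (mV.set k (mV.getD c 0)) (mV.getD k 0) c (pathDownB fuel H n (H.getD k 0) c),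
       shiftB (mE.set k (mE.getD c 0)) (mE.getD k 0) c (pathDownB fuel H n (H.getD k 0) c),
       (pathDownB fuel H n (H.getD k 0) c).getLastD c) := by
  have hxH : ((H.set k (H.getD c 0)).set c (H.getD k 0)).getD c 0 = H.getD k 0 :=
    getD_set_self' _ c _ (by simp [hH]; omega)
  have hxV : ((mV.set k (mV.getD c 0)).set c (mV.getD k 0)).getD c 0 = mV.getD k 0 :=
    getD_set_self' _ c _ (by simp [hV]; omega)
  have hxE : ((mE.set k (mE.getD c 0)).set c (mE.getD k 0)).getD c 0 = mE.getD k 0 :=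
    getD_set_self' _ c _ (by simp [hE]; omega)
  have hpstab : pathDownB fuel ((H.set k (H.getD c 0)).set c (H.getD k 0)) n (H.getD k 0) c =
      pathDownB fuel H n (H.getD k 0) c := by
    apply pathDownB_stable
    intro i hi
    rw [getD_set_ne' _ c i _ (by omega), getD_set_ne' _ k i _ (by omega)]
  have hmem := pathDownB_mem fuel H n (H.getD k 0) c
  rw [IH _ _ _ c (by simp [hH]) (by simp [hV]) (by simp [hE]) hc]
  rw [hxH, hxV, hxE, hpstab]
  have hne : ∀ d ∈ (pathDownB fuel H n (H.getD k 0) c).head?, d ≠ c := by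
    intro d hd
    have := (hmem d (List.mem_of_mem_head? hd)).1
    omega
  rw [shiftB_set_head _ _ _ _ _ hne, shiftB_set_head _ _ _ _ _ hne, shiftB_set_head _ _ _ _ _ hne]

lemma downA_eq (fuel : Nat) : ∀ (H mV mE : List Int) (n k : Nat),
    H.length = n → mV.length = n → mE.length = n → k < n →
    bubbleDownA fuel H mV mE n k =
      (shiftB H (H.getD k 0) k (pathDownB fuel H n (H.getD k 0) k),
       shiftB mV (mV.getD k 0) k (pathDownB fuel H n (H.getD k 0) k),
       shiftB mE (mE.getD k 0) k (pathDownB fuel H n (H.getD k 0) k),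
       (pathDownB fuel H n (H.getD k 0) k).getLastD k) := by
  induction fuel with
  | zero =>
    intro H mV mE n k hH hV hE hk
    simp only [bubbleDownA, pathDownB, shiftB, List.getLastD_nil]
    rw [set_getD_self, set_getD_self, set_getD_self]
  | succ fuel ih =>
    intro H mV mE n k hH hV hE hk
    simp only [bubbleDownA, pathDownB]
    by_cases h1 : 2 * k + 1 < n
    · rw [if_pos (by omega : 2 * (k + 1) ≤ n), if_pos h1]
      by_cases h2 : 2 * k + 2 < n
      · -- two children
        rw [if_neg (by omega : ¬ 2 * (k + 1) + 1 > n)]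
        have el : 2 * (k + 1) - 1 = 2 * k + 1 := by omega
        have er : 2 * (k + 1) = 2 * k + 2 := by omega
        rw [el, er]
        by_cases hlr : H.getD (2 * k + 2) 0 < H.getD (2 * k + 1) 0
        · -- right child smaller: childB = 2k+2
          have hcB : childB H n k = 2 * k + 2 := by unfold childB; rw [if_pos ⟨h2, hlr⟩]
          rw [hcB]
          have hmin : min (H.getD (2 * k + 1) 0) (H.getD (2 * k + 2) 0) = H.getD (2 * k + 2) 0 := by omega
          rw [hmin]
          by_cases hgt : H.getD k 0 > H.getD (2 * k + 2) 0
          · rw [if_pos hgt, if_neg (by omega), if_pos rfl, if_pos hgt]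
            rw [down_step fuel H mV mE n k (2 * k + 2) hH hV hE h2 (by omega) (fun H mV mE k => ih H mV mE n k)]
            simp only [shiftB, List.getLastD_cons]
          · rw [if_neg hgt, if_neg hgt]
            simp only [shiftB, List.getLastD_nil]
            rw [set_getD_self, set_getD_self, set_getD_self]
        · -- left child ≤ right: childB = 2k+1
          have hcB : childB H n k = 2 * k + 1 := by unfold childB; rw [if_neg (by tauto)]
          rw [hcB]
          have hmin : min (H.getD (2 * k + 1) 0) (H.getD (2 * k + 2) 0) = H.getD (2 * k + 1) 0 := by omega
          rw [hmin]
          by_cases hgt : H.getD k 0 > H.getD (2 * k + 1) 0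
          · rw [if_pos hgt, if_pos rfl, if_pos hgt]
            rw [down_step fuel H mV mE n k (2 * k + 1) hH hV hE (by omega) (by omega) (fun H mV mE k => ih H mV mE n k)]
            simp only [shiftB, List.getLastD_cons]
          · rw [if_neg hgt, if_neg hgt]
            simp only [shiftB, List.getLastD_nil]
            rw [set_getD_self, set_getD_self, set_getD_self]
      · -- one child
        rw [if_pos (by omega : 2 * (k + 1) + 1 > n)]
        have el : 2 * (k + 1) - 1 = 2 * k + 1 := by omega
        rw [el]
        have hcB : childB H n k = 2 * k + 1 := by unfold childB; rw [if_neg (by omega)]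
        rw [hcB]
        by_cases hgt : H.getD k 0 > H.getD (2 * k + 1) 0
        · rw [if_pos hgt, if_pos hgt]
          rw [down_step fuel H mV mE n k (2 * k + 1) hH hV hE (by omega) (by omega) (fun H mV mE k => ih H mV mE n k)]
          simp only [shiftB, List.getLastD_cons]
        · rw [if_neg hgt, if_neg hgt]
          simp only [shiftB, List.getLastD_nil]
          rw [set_getD_self, set_getD_self, set_getD_self]
    · rw [if_neg (by omega : ¬ 2 * (k + 1) ≤ n), if_neg h1]
      simp only [shiftB, List.getLastD_nil]
      rw [set_getD_self, set_getD_self, set_getD_self]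

lemma up_step (fuel : Nat) (H mV mE : List Int) (k q : Nat)
    (hq : q < H.length) (hqk : q < k)
    (hV : mV.length = H.length) (hE : mE.length = H.length)
    (IH : ∀ (H mV mE : List Int) (k : Nat), k < H.length → mV.length = H.length → mE.length = H.length →
      bubbleUpA fuel H mV mE k =
        (shiftB H (H.getD k 0) k (pathUpB fuel H (H.getD k 0) k),
         shiftB mV (mV.getD k 0) k (pathUpB fuel H (H.getD k 0) k),
         shiftB mE (mE.getD k 0) k (pathUpB fuel H (H.getD k 0) k))) :
    bubbleUpA fuel
      ((H.set k (H.getD q 0)).set q (H.getD k 0))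
      ((mV.set k (mV.getD q 0)).set q (mV.getD k 0))
      ((mE.set k (mE.getD q 0)).set q (mE.getD k 0)) q =
      (shiftB (H.set k (H.getD q 0)) (H.getD k 0) q (pathUpB fuel H (H.getD k 0) q),
       shiftB (mV.set k (mV.getD q 0)) (mV.getD k 0) q (pathUpB fuel H (H.getD k 0) q),
       shiftB (mE.set k (mE.getD q 0)) (mE.getD k 0) q (pathUpB fuel H (H.getD k 0) q)) := by
  have hxH : ((H.set k (H.getD q 0)).set q (H.getD k 0)).getD q 0 = H.getD k 0 :=
    getD_set_self' _ q _ (by simpa using hq)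
  have hxV : ((mV.set k (mV.getD q 0)).set q (mV.getD k 0)).getD q 0 = mV.getD k 0 :=
    getD_set_self' _ q _ (by simp [hV]; omega)
  have hxE : ((mE.set k (mE.getD q 0)).set q (mE.getD k 0)).getD q 0 = mE.getD k 0 :=
    getD_set_self' _ q _ (by simp [hE]; omega)
  have hpstab : pathUpB fuel ((H.set k (H.getD q 0)).set q (H.getD k 0)) (H.getD k 0) q =
      pathUpB fuel H (H.getD k 0) q := by
    apply pathUpB_stable
    intro i hi
    rw [getD_set_ne' _ q i _ (by omega), getD_set_ne' _ k i _ (by omega)]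
  have hmem := pathUpB_mem fuel H (H.getD k 0) q
  rw [IH _ _ _ q (by simpa using hq) (by simp [hV]) (by simp [hE])]
  rw [hxH, hxV, hxE, hpstab]
  have hne : ∀ d ∈ (pathUpB fuel H (H.getD k 0) q).head?, d ≠ q := by
    intro d hd
    have := hmem d (List.mem_of_mem_head? hd)
    omega
  rw [shiftB_set_head _ _ _ _ _ hne, shiftB_set_head _ _ _ _ _ hne, shiftB_set_head _ _ _ _ _ hne]

lemma upA_eq (fuel : Nat) : ∀ (H mV mE : List Int) (k : Nat),
    k < H.length → mV.length = H.length → mE.length = H.length →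
    bubbleUpA fuel H mV mE k =
      (shiftB H (H.getD k 0) k (pathUpB fuel H (H.getD k 0) k),
       shiftB mV (mV.getD k 0) k (pathUpB fuel H (H.getD k 0) k),
       shiftB mE (mE.getD k 0) k (pathUpB fuel H (H.getD k 0) k)) := by
  induction fuel with
  | zero =>
    intro H mV mE k _ hV hE
    simp only [bubbleUpA, pathUpB, shiftB]
    rw [set_getD_self, set_getD_self, set_getD_self]
  | succ fuel ih =>
    intro H mV mE k hk hV hE
    simp only [bubbleUpA, pathUpB]
    by_cases hg : 0 < k ∧ H.getD k 0 < H.getD ((k - 1) / 2) 0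
    · have eq1 : (k + 1) / 2 - 1 = (k - 1) / 2 := by omega
      rw [eq1, if_pos ⟨hg.1, hg.2⟩, if_pos hg]
      rw [up_step fuel H mV mE k ((k - 1) / 2) (by omega) (by omega) hV hE ih]
      simp only [shiftB]
    · have : ¬ (1 ≤ k ∧ H.getD k 0 < H.getD ((k + 1) / 2 - 1) 0) := by
        intro h
        exact hg ⟨h.1, by have e : (k + 1) / 2 - 1 = (k - 1) / 2 := by omega
                          rw [e] at h; exact h.2⟩
      rw [if_neg this, if_neg hg]
      simp only [shiftB]
      rw [set_getD_self, set_getD_self, set_getD_self]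


lemma prologue_eq (l : List Int) (k : Nat) (h : k < l.length) :
    ((l.set k (l.getD (l.length - 1) 0)).set (l.length - 1) (l.getD k 0)).dropLast =
      if k = l.length - 1 then l.dropLast else l.dropLast.set k (l.getD (l.length - 1) 0) := by
  split
  · next he =>
    subst he
    rw [List.set_set, set_getD_self]
  · next hne =>
    apply List.ext_getElem (by simp)
    intro i h1 h2
    have hi : i < l.length - 1 := by simp at h1; omega
    simp only [List.getElem_dropLast, List.getElem_set]
    rw [if_neg (by omega : ¬ l.length - 1 = i)]

lemma getLastD_lt (p : List Nat) : ∀ (k n : Nat), k < n → (∀ c ∈ p, c < n) → p.getLastD k < n := by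
  induction p with
  | nil => intro k n hk _; exact hk
  | cons c rest ih =>
    intro k n hk hp
    simp only [List.getLastD_cons]
    exact ih c n (hp c (by simp)) (fun d hd => hp d (by simp [hd]))

-- ===== VERDICT =====
theorem heap_delete_spec : Claim_equal_heap_delete := by
  intro H v map_V map_E _ hpre
  obtain ⟨hv, hVl, hEl⟩ := hpre
  unfold Spec_heap_delete heap_delete heap_delete_alt
  cases hidx : PySem.List.index? map_V v with
  | none => rfl
  | some k =>
    have hkV : k < map_V.length := by
      rw [PySem.List.index?_eq_idxOf?] at hidx
      exact (List.idxOf?_eq_some_iff.mp hidx).1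
    have hkH : k < H.length := by omega
    have hkE : k < map_E.length := by omega
    simp only []
    rw [prologue_eq H k hkH, prologue_eq map_V k hkV, prologue_eq map_E k hkE, hVl, hEl]
    by_cases hk : k = H.length - 1
    · rw [if_pos hk, if_pos hk, if_pos hk]
      rw [if_pos (by simp [hk]), if_pos (by simp [hk])]
    · rw [if_neg hk, if_neg hk, if_neg hk]
      rw [if_neg (by simp; omega), if_neg (by simp; omega)]
      simp only [List.length_set, List.length_dropLast]
      set n := H.length - 1 with hn
      have hkn : k < n := by omega
      set H1 := H.dropLast.set k (H.getD n 0) with hH1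
      set mV1 := map_V.dropLast.set k (map_V.getD n 0) with hmV1
      set mE1 := map_E.dropLast.set k (map_E.getD n 0) with hmE1
      have e1 : H1.length = n := by simp [hH1, hn]
      have e2 : mV1.length = n := by simp [hmV1, hn, hVl]
      have e3 : mE1.length = n := by simp [hmE1, hn, hEl]
      rw [downA_eq _ H1 mV1 mE1 n k e1 e2 e3 hkn]
      have hx1 : H1.getD k 0 = H.getD n 0 := getD_set_self' _ k _ (by simp; omega)
      have hx2 : mV1.getD k 0 = map_V.getD n 0 := getD_set_self' _ k _ (by simp; omega)
      have hx3 : mE1.getD k 0 = map_E.getD n 0 := getD_set_self' _ k _ (by simp; omega)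
      rw [hx1, hx2, hx3]
      set xh := H.getD n 0
      set xv := map_V.getD n 0
      set xe := map_E.getD n 0
      set p := pathDownB n H1 n xh k with hp
      set j := p.getLastD k with hj
      set H2 := shiftB H1 xh k p with hH2
      set mV2 := shiftB mV1 xv k p with hmV2
      set mE2 := shiftB mE1 xe k p with hmE2
      have hpmem : ∀ c ∈ p, c < n := fun c hc => (pathDownB_mem n H1 n xh k c hc).2
      have hjn : j < n := getLastD_lt p k n hkn hpmem
      have hH2len : H2.length = n := by rw [hH2, shiftB_length, e1]
      have hmV2len : mV2.length = H2.length := by rw [hmV2, hH2, shiftB_length, shiftB_length, e1, e2]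
      have hmE2len : mE2.length = H2.length := by rw [hmE2, hH2, shiftB_length, shiftB_length, e1, e3]
      rw [upA_eq _ H2 mV2 mE2 j (by omega) hmV2len hmE2len]
      have hy1 : H2.getD j 0 = xh := by
        rw [hH2, hj]; exact shiftB_getD_last p H1 xh k (by omega) (fun c hc => by rw [e1]; exact hpmem c hc)
      have hy2 : mV2.getD j 0 = xv := by
        rw [hmV2, hj]; exact shiftB_getD_last p mV1 xv k (by omega) (fun c hc => by rw [e2]; exact hpmem c hc)
      have hy3 : mE2.getD j 0 = xe := by
        rw [hmE2, hj]; exact shiftB_getD_last p mE1 xe k (by omega) (fun c hc => by rw [e3]; exact hpmem c hc)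
      rw [hy1, hy2, hy3]
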